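-- pv_equiv track=rewrite | github.com/waixiong/PatternImageGenerator | patternDecode.py | extractFromPoints
-- ===== SOURCE A (Python) =====
-- def extractFromPoints(points, maxSize):
--     numberData = 0
--     multipleCounter = 1
--     for point in points:
--         if round(point[0] / 50) > 0 and round(point[0] / 50) < round(maxSize / 50) :
--             xr = round( ((point[0] - (round(point[0] / 50) * 50)) / 5) + 3 )
--             numberData = numberData + xr * multipleCounter
--             multipleCounter *= 8
--         if round(point[1] / 50) > 0 and round(point[1] / 50) < round(maxSize / 50) :
--             yr = round( ((point[1] - (round(point[1] / 50) * 50)) / 5) + 3 )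
--             numberData = numberData + yr * multipleCounter
--             multipleCounter *= 8
--     return numberData, multipleCounter
-- ===== SOURCE B (Python) =====
-- def extractFromPoints(points, maxSize):
--     # Divide-and-conquer: each half yields (value, multiplier); halves combine with the
--     # monoid (v1 + m1*v2, m1*m2), instead of A's stateful left-to-right accumulation.
--     limit = round(maxSize / 50)
--
--     def ok(c):
--         return 0 < round(c / 50) < limit
--
--     def digit(c):
--         return round(((c - round(c / 50) * 50) / 5) + 3)
--
--     def solve(pts):
--         if not pts:
--             return (0, 1)
--         if len(pts) == 1:
--             x, y = pts[0]
--             v, m = 0, 1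
--             if ok(x):
--                 v, m = digit(x), 8
--             if ok(y):
--                 v, m = v + digit(y) * m, m * 8
--             return (v, m)
--         mid = len(pts) // 2
--         v1, m1 = solve(pts[:mid])
--         v2, m2 = solve(pts[mid:])
--         return (v1 + m1 * v2, m1 * m2)
--
--     return solve(points)
-- ===== Notes on version B (the rewrite author's own statement) =====
-- stated objective: alternative
-- what changed: Replaces A's stateful left-to-right (numberData, multipleCounter) accumulation with a divide-and-conquer recursion: the point list is split in half, each half is solved to a (value, multiplier) pair, and the halves are combined with the monoid operation (v1 + m1*v2, m1*m2); correctness rests on this combine being associative and matching base-8 positional concatenation.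
import Mathlib
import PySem

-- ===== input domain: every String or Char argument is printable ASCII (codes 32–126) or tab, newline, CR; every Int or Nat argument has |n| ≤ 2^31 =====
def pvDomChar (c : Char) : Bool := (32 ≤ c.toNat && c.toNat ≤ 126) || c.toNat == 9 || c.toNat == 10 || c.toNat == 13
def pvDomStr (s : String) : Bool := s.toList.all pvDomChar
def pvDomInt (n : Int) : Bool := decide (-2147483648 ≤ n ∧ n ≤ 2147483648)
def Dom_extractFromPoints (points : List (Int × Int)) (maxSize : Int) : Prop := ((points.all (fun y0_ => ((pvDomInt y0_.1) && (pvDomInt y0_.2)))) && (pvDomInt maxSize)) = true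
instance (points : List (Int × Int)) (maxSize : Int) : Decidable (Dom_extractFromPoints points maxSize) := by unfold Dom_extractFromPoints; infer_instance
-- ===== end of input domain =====

-- B replaces A's stateful left-to-right accumulation by a divide-and-conquer recursion
-- combining per-half (value, multiplier) pairs; objective: alternative (same cost).

-- ===== PORT A =====
-- Exact model of Python's round(x / 50) for an int x with |x| ≤ 2^31: the float quotient
-- is close enough to the rational x/50 that rounding agrees, and exact at the half-way
-- ties x ≡ 25 (mod 50), where Python rounds to the even integer.
def pvRound50 (x : Int) : Int :=
  let q := PySem.Int.floordiv (x + 25) 50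
  if (x + 25) % 50 = 0 ∧ q % 2 = 1 then q - 1 else q

-- Exact model of Python's round((x - round(x/50)*50) / 5 + 3) for |x| ≤ 2^31: with
-- r = x - round(x/50)*50 an integer, (r + 15)/5 is never a half-integer, so the float
-- rounds to the nearest integer, i.e. floor((2r + 35) / 10).
def pvDigit (x : Int) : Int :=
  let r := x - pvRound50 x * 50
  PySem.Int.floordiv (2 * r + 35) 10

def extractFromPoints (points : List (Int × Int)) (maxSize : Int) : Int × Int :=
  points.foldl (fun (s : Int × Int) point =>
    let s := if pvRound50 point.1 > 0 ∧ pvRound50 point.1 < pvRound50 maxSize then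
        (s.1 + pvDigit point.1 * s.2, s.2 * 8) else s
    if pvRound50 point.2 > 0 ∧ pvRound50 point.2 < pvRound50 maxSize then
        (s.1 + pvDigit point.2 * s.2, s.2 * 8) else s) (0, 1)

-- ===== PORT B =====
-- single point's (value, multiplier) pair (Source B's len == 1 base case)
def pvSingle (lim : Int) (p : Int × Int) : Int × Int :=
  let s : Int × Int := (0, 1)
  let s := if 0 < pvRound50 p.1 ∧ pvRound50 p.1 < lim then (pvDigit p.1, 8) else s
  if 0 < pvRound50 p.2 ∧ pvRound50 p.2 < lim then (s.1 + pvDigit p.2 * s.2, s.2 * 8) else s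

-- Source B's solve: split in half, recurse, combine with (v1 + m1*v2, m1*m2)
def pvSolve (lim : Int) : List (Int × Int) → Int × Int
  | [] => (0, 1)
  | [p] => pvSingle lim p
  | p :: q :: rest =>
    let pts := p :: q :: rest
    let mid := pts.length / 2
    let a := pvSolve lim (pts.take mid)
    let b := pvSolve lim (pts.drop mid)
    (a.1 + a.2 * b.1, a.2 * b.2)
termination_by pts => pts.length
decreasing_by
  · simp [List.length_take]; omega
  · simp [List.length_drop]; omega

def extractFromPoints_alt (points : List (Int × Int)) (maxSize : Int) : Int × Int :=
  pvSolve (pvRound50 maxSize) points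

-- ===== PRECONDITION & SPEC =====
def Spec_extractFromPoints (points : List (Int × Int)) (maxSize : Int) (out : Int × Int) : Prop := out = extractFromPoints_alt points maxSize
instance (points : List (Int × Int)) (maxSize : Int) (out : Int × Int) : Decidable (Spec_extractFromPoints points maxSize out) := by unfold Spec_extractFromPoints; infer_instance

-- ===== CLAIM (what is proved, stated in full; the proofs are below) =====
def Claim_equal_extractFromPoints : Prop := ∀ (points : List (Int × Int)) (maxSize : Int), Dom_extractFromPoints points maxSize → Spec_extractFromPoints points maxSize (extractFromPoints points maxSize)

-- ===== LEMMAS AND PROOFS =====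

-- A's per-coordinate step.
def pvStepC (lim : Int) (s : Int × Int) (c : Int) : Int × Int :=
  if pvRound50 c > 0 ∧ pvRound50 c < lim then (s.1 + pvDigit c * s.2, s.2 * 8) else s

-- A's fold from an arbitrary state is an affine function of B's (value, multiplier) pair.
theorem foldA_solve (lim : Int) (pts : List (Int × Int)) : ∀ (n m : Int),
    pts.foldl (fun s p => pvStepC lim (pvStepC lim s p.1) p.2) (n, m) =
      (n + m * (pvSolve lim pts).1, m * (pvSolve lim pts).2) := by
  induction pts using pvSolve.induct lim with
  | case1 => intro n m; simp [pvSolve]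
  | case2 p =>
    intro n m
    simp only [List.foldl_cons, List.foldl_nil, pvSolve, pvSingle, pvStepC]
    by_cases h1 : pvRound50 p.1 > 0 ∧ pvRound50 p.1 < lim <;>
      by_cases h2 : pvRound50 p.2 > 0 ∧ pvRound50 p.2 < lim <;>
        simp [h1, h2, gt_iff_lt] <;> ring_nf <;> simp
  | case3 p q rest pts mid ih1 ih2 =>
    intro n m
    rw [pvSolve]
    have hsplit : p :: q :: rest =
        (p :: q :: rest).take ((p :: q :: rest).length / 2) ++
        (p :: q :: rest).drop ((p :: q :: rest).length / 2) :=
      (List.take_append_drop _ _).symm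
    conv_lhs => rw [hsplit]
    rw [List.foldl_append, ih1, ih2]
    simp only [Prod.mk.injEq]
    constructor <;> ring

-- ===== VERDICT (by name: the statement is the Claim_ definition above) =====
theorem extractFromPoints_spec : Claim_equal_extractFromPoints := by
  intro points maxSize _
  show extractFromPoints points maxSize = extractFromPoints_alt points maxSize
  have hA : extractFromPoints points maxSize =
      points.foldl (fun s p => pvStepC (pvRound50 maxSize) (pvStepC (pvRound50 maxSize) s p.1) p.2)
        (0, 1) := rfl
  rw [hA, foldA_solve]
  simp [extractFromPoints_alt]
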